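-- pv_equiv track=rewrite | github.com/pavloteyfel/data-structures-and-algortihms | structures/graph_func.py | shortest_neighbour
-- ===== SOURCE A (Python) =====
-- from collections import deque
--
-- def create_graph(edges: list[tuple[str, str]]) -> dict:
--     """Create graph structure from edge list"""
--     graph = {}
--     for a, b in edges:
--         if a not in graph:
--             graph[a] = []
--         graph[a].append(b)
--         if b not in graph:
--             graph[b] = []
--         graph[b].append(a)
--     return graph
--
-- def shortest_neighbour(edges, src, dst):
--     """Return shortest path between two nodes"""
--     graph = create_graph(edges)
--     queue = deque()
--     memo = set()
--
--     queue.append((src, 0))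
--     memo.add(src)
--
--     while queue:
--         node, distance = queue.popleft()
--
--         if node == dst:
--             return distance
--
--         for vertex in graph[node]:
--             if vertex not in memo:
--                 queue.append((vertex, distance + 1))
--                 memo.add(vertex)
--
--     return None
-- ===== SOURCE B (Python) =====
-- def _relax(dist, x, y):
--     """Try to improve y's distance via the edge x-y; return True if dist changed."""
--     dx = dist.get(x)
--     if dx is not None:
--         dy = dist.get(y)
--         if dy is None or dx + 1 < dy:
--             dist[y] = dx + 1
--             return True
--     return False
--
-- def shortest_neighbour(edges, src, dst):
--     """Shortest path length via Bellman-Ford-style relaxation over the raw edge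
--     list: a node->distance map is repeatedly relaxed along every edge (both
--     directions) until a full pass changes nothing.  No adjacency structure,
--     queue or visited set is built."""
--     dist = {src: 0}
--     for _ in range(2 * len(edges)):
--         changed = False
--         for a, b in edges:
--             if _relax(dist, a, b):
--                 changed = True
--             if _relax(dist, b, a):
--                 changed = True
--         if not changed:
--             break
--     return dist.get(dst)
-- ===== Notes on version B (the rewrite author's own statement) =====
-- stated objective: alternative
-- what changed: Replaces BFS (adjacency dict + deque + visited set) by Bellman-Ford-style relaxation: a node-to-distance map is repeatedly relaxed along the raw edge list, in both directions, until a full pass changes nothing; no graph structure, queue or visited set is built.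
import Mathlib
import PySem

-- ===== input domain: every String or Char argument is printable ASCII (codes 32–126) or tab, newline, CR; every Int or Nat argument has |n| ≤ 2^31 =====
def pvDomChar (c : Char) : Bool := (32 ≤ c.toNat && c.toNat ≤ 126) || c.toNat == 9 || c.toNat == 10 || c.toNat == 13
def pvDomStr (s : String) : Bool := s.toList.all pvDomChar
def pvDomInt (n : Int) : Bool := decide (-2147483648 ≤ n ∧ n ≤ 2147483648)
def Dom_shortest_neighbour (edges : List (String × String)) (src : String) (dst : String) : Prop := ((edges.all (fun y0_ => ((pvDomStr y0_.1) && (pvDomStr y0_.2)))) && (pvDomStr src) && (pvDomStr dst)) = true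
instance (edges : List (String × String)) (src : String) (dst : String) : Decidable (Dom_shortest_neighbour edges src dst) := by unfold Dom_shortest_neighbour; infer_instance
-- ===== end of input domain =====

-- B replaces A's BFS (adjacency dict + deque + visited set) by Bellman-Ford-style relaxation of a
-- node→distance map along the raw edge list until a pass changes nothing; same return value on Pre_.

-- ===== PORT A =====
-- helper of A: the identical create_graph
def create_graph (edges : List (String × String)) : PySem.Dict String (List String) :=
  edges.foldl (fun g p =>
    let g := if g.contains p.1 then g else g.insert p.1 []
    let g := g.modify p.1 [] (fun l => l ++ [p.2])
    let g := if g.contains p.2 then g else g.insert p.2 []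
    g.modify p.2 [] (fun l => l ++ [p.1])) PySem.Dict.empty

-- one step of A's inner 'for vertex in graph[node]' loop (queue, memo as state)
def stepA (d : Int) (qm : List (String × Int) × PySem.Set String) (v : String) :
    List (String × Int) × PySem.Set String :=
  if qm.2.contains v then qm else (qm.1 ++ [(v, d + 1)], PySem.Set.add qm.2 v)

-- A's while loop; fuel only makes it total (one unit per popped node; the initial fuel
-- 2*|edges|+2 exceeds the number of distinct nodes, so it is never exhausted in fact)
def goA (g : PySem.Dict String (List String)) (dst : String) :
    Nat → List (String × Int) → PySem.Set String → Option Int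
  | 0, _, _ => none
  | _ + 1, [], _ => none
  | f + 1, (node, d) :: rest, memo =>
    if node = dst then some d
    else
      let p := (g.getD node []).foldl (stepA d) (rest, memo)
      goA g dst f p.1 p.2

def shortest_neighbour (edges : List (String × String)) (src : String) (dst : String) : Option Int :=
  let graph := create_graph edges
  goA graph dst (2 * edges.length + 2) [(src, 0)] (PySem.Set.add PySem.Set.empty src)

-- ===== PORT B =====
-- B's helper _relax: try to improve y's distance via the edge x-y; flag = "dist changed"
def relax1 (d : PySem.Dict String Int) (x y : String) : PySem.Dict String Int × Bool :=
  match d.get? x with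
  | none => (d, false)
  | some dx =>
    match d.get? y with
    | none => (d.insert y (dx + 1), true)
    | some dy => if dx + 1 < dy then (d.insert y (dx + 1), true) else (d, false)

-- one edge of B's inner 'for a, b in edges' loop (state: dist, changed)
def relaxB (s : PySem.Dict String Int × Bool) (p : String × String) :
    PySem.Dict String Int × Bool :=
  let s1 := relax1 s.1 p.1 p.2
  let s2 := relax1 s1.1 p.2 p.1
  (s2.1, s.2 || s1.2 || s2.2)

-- B's outer 'for _ in range(2*len(edges))' loop with its 'if not changed: break'
def bfRounds (edges : List (String × String)) :
    Nat → PySem.Dict String Int → PySem.Dict String Int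
  | 0, d => d
  | k + 1, d =>
    let p := edges.foldl relaxB (d, false)
    if p.2 then bfRounds edges k p.1 else p.1

def shortest_neighbour_alt (edges : List (String × String)) (src : String) (dst : String) : Option Int :=
  let dist := bfRounds edges (2 * edges.length) (PySem.Dict.empty.insert src 0)
  dist.get? dst

-- ===== PRECONDITION & SPEC =====
-- Pre_ excludes exactly the inputs where the Python A raises KeyError (src absent from the
-- graph while src ≠ dst); nothing on which A returns is excluded.
def Pre_shortest_neighbour (edges : List (String × String)) (src : String) (dst : String) : Prop :=
  src = dst ∨ ∃ p ∈ edges, p.1 = src ∨ p.2 = src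
instance (edges : List (String × String)) (src : String) (dst : String) :
    Decidable (Pre_shortest_neighbour edges src dst) := by
  unfold Pre_shortest_neighbour; infer_instance

def pvWitness_shortest_neighbour : (List (String × String)) × String × String :=
  ([("a", "b"), ("b", "c")], "a", "c")

def Spec_shortest_neighbour (edges : List (String × String)) (src : String) (dst : String) (out : Option Int) : Prop := out = shortest_neighbour_alt edges src dst
instance (edges : List (String × String)) (src : String) (dst : String) (out : Option Int) : Decidable (Spec_shortest_neighbour edges src dst out) := by unfold Spec_shortest_neighbour; infer_instance

-- ===== CLAIM (what is proved, stated in full; the proofs are below) =====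
def Claim_equal_shortest_neighbour : Prop := ∀ (edges : List (String × String)) (src : String) (dst : String), Dom_shortest_neighbour edges src dst → Pre_shortest_neighbour edges src dst → Spec_shortest_neighbour edges src dst (shortest_neighbour edges src dst)

-- ===== LEMMAS AND PROOFS =====

----------------------------------------------------------------------------------------------
-- Part 0: an intermediate level-synchronous BFS, and the simulation  goA ≃ goL  (pure fuel
-- bookkeeping; all semantic content comes later).
----------------------------------------------------------------------------------------------

def stepL (nv : List String × PySem.Set String) (v : String) : List String × PySem.Set String :=
  if nv.2.contains v then nv else (nv.1 ++ [v], PySem.Set.add nv.2 v)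

-- scanning one frontier: inl = early return, inr = (remaining fuel, next frontier, visited)
def levelL (g : PySem.Dict String (List String)) (dst : String) (d : Int) :
    Nat → List String → List String → PySem.Set String →
    Sum (Option Int) (Nat × List String × PySem.Set String)
  | f, [], nxt, vis => Sum.inr (f, nxt, vis)
  | 0, _ :: _, _, _ => Sum.inl none
  | f + 1, node :: rest, nxt, vis =>
    if node = dst then Sum.inl (some d)
    else
      let p := (g.getD node []).foldl stepL (nxt, vis)
      levelL g dst d f rest p.1 p.2

theorem levelL_fuel_le (g : PySem.Dict String (List String)) (dst : String) (d : Int) :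
    ∀ (cur : List String) (f : Nat) (nxt : List String) (vis : PySem.Set String)
      (f' : Nat) (nxt' : List String) (vis' : PySem.Set String),
      levelL g dst d f cur nxt vis = Sum.inr (f', nxt', vis') → f' ≤ f ∧ (cur ≠ [] → f' < f) := by
  intro cur
  induction cur with
  | nil => intro f nxt vis f' nxt' vis' h; simp [levelL] at h; simp [h.1]
  | cons node rest ih =>
    intro f nxt vis f' nxt' vis' h
    cases f with
    | zero => simp [levelL] at h
    | succ f =>
      simp only [levelL] at h
      split at h
      · simp at h
      · have := ih f _ _ f' nxt' vis' h
        exact ⟨by omega, fun _ => by omega⟩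

def goL (g : PySem.Dict String (List String)) (dst : String) :
    Nat → List String → PySem.Set String → Int → Option Int
  | _, [], _, _ => none
  | f, node :: rest, vis, d =>
    match h : levelL g dst d f (node :: rest) [] vis with
    | Sum.inl r => r
    | Sum.inr (f', nxt, vis') => goL g dst f' nxt vis' (d + 1)
  termination_by f _ _ _ => f
  decreasing_by
    exact (levelL_fuel_le g dst d (node :: rest) f [] vis f' nxt vis' h).2 (by simp)

-- A's inner fold on the queue-suffix ≃ the level fold on the next frontier
theorem fold_sim (d : Int) :
    ∀ (nbrs : List String) (restm : List (String × Int)) (nxt : List String) (vis : PySem.Set String),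
      nbrs.foldl (stepA d) (restm ++ nxt.map (fun n => (n, d + 1)), vis)
        = (restm ++ ((nbrs.foldl stepL (nxt, vis)).1).map (fun n => (n, d + 1)),
           (nbrs.foldl stepL (nxt, vis)).2) := by
  intro nbrs
  induction nbrs with
  | nil => intro restm nxt vis; rfl
  | cons v vs ih =>
    intro restm nxt vis
    simp only [List.foldl_cons, stepA, stepL]
    by_cases hv : v ∈ vis
    · simp only [PySem.Set.contains_eq_listContains, List.contains_iff_mem, hv, if_pos]
      exact ih restm nxt vis
    · simp only [PySem.Set.contains_eq_listContains, List.contains_iff_mem, hv, if_neg,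
        not_false_eq_true]
      have harr : (restm ++ nxt.map (fun n => (n, d + 1))) ++ [(v, d + 1)]
           = restm ++ (nxt ++ [v]).map (fun n => (n, d + 1)) := by
        simp [List.map_append]
      rw [harr]
      exact ih restm (nxt ++ [v]) (PySem.Set.add vis v)

theorem goL_cons (g : PySem.Dict String (List String)) (dst : String) (f : Nat)
    (node : String) (rest : List String) (vis : PySem.Set String) (d : Int) :
    goL g dst f (node :: rest) vis d
      = (match levelL g dst d f (node :: rest) [] vis with
         | Sum.inl r => r
         | Sum.inr (f', nxt, vis') => goL g dst f' nxt vis' (d + 1)) := by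
  rw [goL]
  rcases h : levelL g dst d f (node :: rest) [] vis with r | ⟨f', nxt, vis'⟩
  · simp
  · simp

-- main simulation: A's queue 'cur at distance d, then nxt at distance d+1' vs the level state
theorem main_sim (g : PySem.Dict String (List String)) (dst : String) :
    ∀ (f : Nat) (cur nxt : List String) (vis : PySem.Set String) (d : Int),
      goA g dst f (cur.map (fun n => (n, d)) ++ nxt.map (fun n => (n, d + 1))) vis
        = (match levelL g dst d f cur nxt vis with
           | Sum.inl r => r
           | Sum.inr (f', nxt', vis') => goL g dst f' nxt' vis' (d + 1)) := by
  intro f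
  induction f with
  | zero =>
    intro cur nxt vis d
    cases cur with
    | nil =>
      cases nxt with
      | nil => simp [goA, levelL, goL]
      | cons n r => simp [goA, levelL, goL]
    | cons node rest => simp [goA, levelL]
  | succ f ih =>
    have hne : ∀ (node : String) (rest nxt : List String) (vis : PySem.Set String) (d : Int),
        goA g dst (f + 1) ((node :: rest).map (fun n => (n, d)) ++ nxt.map (fun n => (n, d + 1))) vis
          = (match levelL g dst d (f + 1) (node :: rest) nxt vis with
             | Sum.inl r => r
             | Sum.inr (f', nxt', vis') => goL g dst f' nxt' vis' (d + 1)) := by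
      intro node rest nxt vis d
      simp only [List.map_cons, List.cons_append, goA, levelL]
      by_cases hd : node = dst
      · simp [hd]
      · simp only [hd, if_false]
        rw [fold_sim]
        exact ih rest _ _ d
    intro cur nxt vis d
    cases cur with
    | nil =>
      cases nxt with
      | nil => simp [goA, levelL, goL]
      | cons n r =>
        have hthis := hne n r [] vis (d + 1)
        simp only [List.map_nil, List.append_nil] at hthis ⊢
        rw [show levelL g dst d (f + 1) [] (n :: r) vis = Sum.inr (f + 1, n :: r, vis) from rfl]
        simp only [List.nil_append]
        show goA g dst (f + 1) ((n :: r).map (fun n => (n, d + 1))) vis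
           = goL g dst (f + 1) (n :: r) vis (d + 1)
        rw [goL_cons]
        exact hthis
    | cons node rest => exact hne node rest nxt vis d

----------------------------------------------------------------------------------------------
-- Part 1: the graph relation and the distance balls.
----------------------------------------------------------------------------------------------

-- v is a Python-neighbour of u
def relB (edges : List (String × String)) (u v : String) : Bool :=
  edges.any (fun p => (p.1 == u && p.2 == v) || (p.1 == v && p.2 == u))

-- ballB k v ↔ v is reachable from src in at most k steps
def ballB (edges : List (String × String)) (src : String) : Nat → String → Bool
  | 0, v => v == src
  | k + 1, v => ballB edges src k v || edges.any (fun p =>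
      (ballB edges src k p.1 && p.2 == v) || (ballB edges src k p.2 && p.1 == v))

-- the exact level sets
def Lb (edges : List (String × String)) (src : String) : Nat → String → Bool
  | 0, v => v == src
  | k + 1, v => ballB edges src (k + 1) v && ! ballB edges src k v

-- all nodes of the graph (plus src)
def nodesList (edges : List (String × String)) (src : String) : List String :=
  src :: edges.flatMap (fun p => [p.1, p.2])

theorem relB_comm (edges : List (String × String)) (u v : String) :
    relB edges u v = relB edges v u := by
  simp only [relB]
  congr 1; funext p; rcases p with ⟨a, b⟩; simp [Bool.or_comm]

theorem ball_succ_iff (edges : List (String × String)) (src : String) (k : Nat) (v : String) :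
    ballB edges src (k + 1) v = true ↔
      ballB edges src k v = true ∨ ∃ u, ballB edges src k u = true ∧ relB edges u v = true := by
  simp only [ballB, relB, Bool.or_eq_true, List.any_eq_true, Bool.and_eq_true, beq_iff_eq]
  constructor
  · rintro (h | ⟨p, hp, ⟨h1, h2⟩ | ⟨h1, h2⟩⟩)
    · exact Or.inl h
    · exact Or.inr ⟨p.1, h1, p, hp, Or.inl ⟨rfl, h2⟩⟩
    · exact Or.inr ⟨p.2, h1, p, hp, Or.inr ⟨h2, rfl⟩⟩
  · rintro (h | ⟨u, hu, p, hp, ⟨h1, h2⟩ | ⟨h1, h2⟩⟩)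
    · exact Or.inl h
    · exact Or.inr ⟨p, hp, Or.inl ⟨h1 ▸ hu, h2⟩⟩
    · exact Or.inr ⟨p, hp, Or.inr ⟨h2 ▸ hu, h1⟩⟩

theorem ball_mono (edges : List (String × String)) (src : String) {j k : Nat} (h : j ≤ k)
    {v : String} (hv : ballB edges src j v = true) : ballB edges src k v = true := by
  induction k with
  | zero =>
    have : j = 0 := by omega
    subst this; exact hv
  | succ k ih =>
    rcases Nat.lt_or_ge j (k + 1) with hl | hl
    · have := ih (by omega)
      simp [ballB, this]
    · have : j = k + 1 := by omega
      subst this; exact hv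

theorem Lb_ball (edges : List (String × String)) (src : String) (k : Nat) (v : String)
    (h : Lb edges src k v = true) : ballB edges src k v = true := by
  cases k with
  | zero => exact h
  | succ k =>
    simp only [Lb, Bool.and_eq_true] at h
    exact h.1

theorem ball_of_Lb_false (edges : List (String × String)) (src : String) (k : Nat) (v : String)
    (hb : ballB edges src k v = true)
    (hprev : ∀ j < k, ballB edges src j v = false) : Lb edges src k v = true := by
  cases k with
  | zero => exact hb
  | succ k => simp [Lb, hb, hprev k (by omega)]

theorem L_step (edges : List (String × String)) (src : String) (k : Nat) (v : String) :
    ballB edges src (k + 1) v = true ↔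
      ballB edges src k v = true ∨ ∃ u, Lb edges src k u = true ∧ relB edges u v = true := by
  rw [ball_succ_iff]
  constructor
  · rintro (h | ⟨u, hu, hrel⟩)
    · exact Or.inl h
    · by_cases hv : ballB edges src k v = true
      · exact Or.inl hv
      · right
        cases k with
        | zero =>
          exact ⟨u, hu, hrel⟩
        | succ k =>
          by_cases hu' : ballB edges src k u = true
          · exfalso
            exact hv ((ball_succ_iff edges src k v).mpr (Or.inr ⟨u, hu', hrel⟩))
          · refine ⟨u, ?_, hrel⟩
            simp only [Lb, Bool.and_eq_true, Bool.not_eq_true']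
            exact ⟨hu, by simpa using hu'⟩
  · rintro (h | ⟨u, hu, hrel⟩)
    · exact Or.inl h
    · exact Or.inr ⟨u, Lb_ball _ _ _ _ hu, hrel⟩

theorem rel_mem_nodes (edges : List (String × String)) (src : String) {u v : String}
    (h : relB edges u v = true) : v ∈ nodesList edges src := by
  simp only [relB, List.any_eq_true, Bool.or_eq_true, Bool.and_eq_true, beq_iff_eq] at h
  rcases h with ⟨p, hp, ⟨h1, h2⟩ | ⟨h1, h2⟩⟩ <;>
    [(subst h2); (subst h1)] <;>
    · simp only [nodesList, List.mem_cons, List.mem_flatMap]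
      exact Or.inr ⟨p, hp, by simp⟩

theorem ball_mem_nodes (edges : List (String × String)) (src : String) {k : Nat} {v : String}
    (h : ballB edges src k v = true) : v ∈ nodesList edges src := by
  induction k generalizing v with
  | zero =>
    simp only [ballB, beq_iff_eq] at h; subst h; simp [nodesList]
  | succ k ih =>
    rcases (ball_succ_iff ..).mp h with h | ⟨u, _, hrel⟩
    · exact ih h
    · exact rel_mem_nodes edges src hrel

theorem length_nodesList (edges : List (String × String)) (src : String) :
    (nodesList edges src).length = 2 * edges.length + 1 := by
  simp only [nodesList, List.length_cons, List.length_flatMap]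
  induction edges with
  | nil => simp
  | cons p l ih => simp at ih ⊢; omega

-- the target value both programs compute: the distance from level k onwards (proof-side only)
noncomputable def distFrom (edges : List (String × String)) (src dst : String) (k : Nat) : Option Int :=
  @dite (Option Int) (∃ j, ballB edges src (k + j) dst = true) (Classical.dec _)
    (fun h => some ((k : Int) + (Nat.find h : Int))) (fun _ => none)

theorem distFrom_here (edges : List (String × String)) (src dst : String) (k : Nat)
    (h : ballB edges src k dst = true) : distFrom edges src dst k = some (k : Int) := by
  have hex : ∃ j, ballB edges src (k + j) dst = true := ⟨0, h⟩
  rw [distFrom, dif_pos hex]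
  have : Nat.find hex = 0 := by
    rw [Nat.find_eq_zero]; simpa using h
  simp [this]

theorem distFrom_shift (edges : List (String × String)) (src dst : String) (k : Nat)
    (h : ballB edges src k dst = false) :
    distFrom edges src dst k = distFrom edges src dst (k + 1) := by
  by_cases hex : ∃ j, ballB edges src (k + 1 + j) dst = true
  · have hex0 : ∃ j, ballB edges src (k + j) dst = true :=
      ⟨Nat.find hex + 1, by
        rw [show k + (Nat.find hex + 1) = k + 1 + Nat.find hex by omega]
        exact Nat.find_spec hex⟩
    rw [distFrom, distFrom, dif_pos hex, dif_pos hex0]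
    have hA : Nat.find hex0 = Nat.find hex + 1 := by
      apply le_antisymm
      · exact Nat.find_min' hex0 (by
          rw [show k + (Nat.find hex + 1) = k + 1 + Nat.find hex by omega]
          exact Nat.find_spec hex)
      · have hne : Nat.find hex0 ≠ 0 := by
          intro h0
          have hs := Nat.find_spec hex0
          rw [h0, Nat.add_zero, h] at hs
          cases hs
        have hspec := Nat.find_spec hex0
        have hmv : ballB edges src (k + 1 + (Nat.find hex0 - 1)) dst = true := by
          rw [show k + 1 + (Nat.find hex0 - 1) = k + Nat.find hex0 by omega]
          exact hspec
        have := Nat.find_min' hex hmv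
        omega
    rw [hA]
    congr 1
    push_cast
    ring
  · have hex0 : ¬ ∃ j, ballB edges src (k + j) dst = true := by
      rintro ⟨j, hj⟩
      cases j with
      | zero => rw [Nat.add_zero, h] at hj; cases hj
      | succ j => exact hex ⟨j, by rwa [show k + 1 + j = k + (j + 1) by omega]⟩
    rw [distFrom, distFrom, dif_neg hex, dif_neg hex0]

----------------------------------------------------------------------------------------------
-- Part 2: create_graph's adjacency lists realise relB.
----------------------------------------------------------------------------------------------

def cgStep (g : PySem.Dict String (List String)) (p : String × String) :
    PySem.Dict String (List String) :=
  let g := if g.contains p.1 then g else g.insert p.1 []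
  let g := g.modify p.1 [] (fun l => l ++ [p.2])
  let g := if g.contains p.2 then g else g.insert p.2 []
  g.modify p.2 [] (fun l => l ++ [p.1])

theorem create_graph_eq_foldl (edges : List (String × String)) :
    create_graph edges = edges.foldl cgStep PySem.Dict.empty := rfl

theorem getD_insert_empty_list (g : PySem.Dict String (List String)) (a u : String) :
    ((if g.contains a then g else g.insert a []).getD u []) = g.getD u [] := by
  split
  · rfl
  · rename_i hc
    rw [PySem.Dict.getD_insert]
    split
    · rename_i he; subst he
      rw [PySem.Dict.getD_of_not_contains _ _ (by simpa using hc)]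
    · rfl

theorem cgStep_getD (g : PySem.Dict String (List String)) (p : String × String) (u : String) :
    (cgStep g p).getD u []
      = (g.getD u [] ++ (if p.1 = u then [p.2] else [])) ++ (if p.2 = u then [p.1] else []) := by
  unfold cgStep
  have e1 : ∀ w, ((if g.contains p.1 = true then g else g.insert p.1 []).getD w []) = g.getD w [] :=
    fun w => getD_insert_empty_list g p.1 w
  have e2 : ∀ w, (((if g.contains p.1 = true then g else g.insert p.1 []).modify p.1 []
      (fun l => l ++ [p.2])).getD w [])
      = if w = p.1 then g.getD p.1 [] ++ [p.2] else g.getD w [] := by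
    intro w
    rw [PySem.Dict.getD_modify]
    by_cases h : w = p.1
    · rw [if_pos h, if_pos h, e1]
    · rw [if_neg h, if_neg h, e1]
  set g2 := (if g.contains p.1 = true then g else g.insert p.1 []).modify p.1 []
      (fun l => l ++ [p.2]) with hg2
  have e3 : ∀ w, ((if g2.contains p.2 = true then g2 else g2.insert p.2 []).getD w [])
      = g2.getD w [] := fun w => getD_insert_empty_list g2 p.2 w
  rw [PySem.Dict.getD_modify]
  by_cases h2 : u = p.2
  · rw [if_pos h2, e3, e2]
    subst h2
    by_cases h1 : p.1 = p.2
    · rw [if_pos (h1.symm), if_pos h1, if_pos rfl, h1]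
    · rw [if_neg (fun hh => h1 hh.symm), if_neg h1, if_pos rfl, List.append_nil]
  · rw [if_neg h2, e3, e2]
    have h2' : p.2 ≠ u := fun hh => h2 hh.symm
    by_cases h1 : u = p.1
    · subst h1
      rw [if_pos rfl, if_pos rfl, if_neg h2', List.append_nil]
    · rw [if_neg h1, if_neg (fun hh => h1 hh.symm), if_neg h2', List.append_nil, List.append_nil]

theorem foldl_cgStep_getD (l : List (String × String)) :
    ∀ (g : PySem.Dict String (List String)) (u : String),
      (l.foldl cgStep g).getD u []
        = g.getD u [] ++ l.flatMap (fun p =>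
            (if p.1 = u then [p.2] else []) ++ (if p.2 = u then [p.1] else [])) := by
  induction l with
  | nil => intro g u; simp
  | cons p l ih =>
    intro g u
    simp only [List.foldl_cons, List.flatMap_cons]
    rw [ih, cgStep_getD]
    simp [List.append_assoc]

theorem mem_create_graph_getD (edges : List (String × String)) (u v : String) :
    v ∈ (create_graph edges).getD u [] ↔ relB edges u v = true := by
  rw [create_graph_eq_foldl, foldl_cgStep_getD]
  simp only [PySem.Dict.getD_empty, List.nil_append, List.mem_flatMap, List.mem_append,
    relB, List.any_eq_true]
  constructor
  · rintro ⟨p, hp, h | h⟩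
    · refine ⟨p, hp, ?_⟩
      by_cases h1 : p.1 = u <;> simp_all
    · refine ⟨p, hp, ?_⟩
      by_cases h2 : p.2 = u <;> simp_all
  · rintro ⟨p, hp, h⟩
    rcases Bool.or_eq_true .. |>.mp h with h1 | h1 <;>
      [(refine ⟨p, hp, Or.inl ?_⟩); (refine ⟨p, hp, Or.inr ?_⟩)] <;>
      · have ha := (Bool.and_eq_true .. |>.mp h1).1
        have hb := (Bool.and_eq_true .. |>.mp h1).2
        simp only [beq_iff_eq] at ha hb
        simp [ha, hb]

----------------------------------------------------------------------------------------------
-- Part 3: correctness of the level BFS goL.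
----------------------------------------------------------------------------------------------

-- the frontier-expansion fold, and its characterisation
def expandL (g : PySem.Dict String (List String)) (s : List String × PySem.Set String)
    (node : String) : List String × PySem.Set String :=
  (g.getD node []).foldl stepL s

theorem stepL_chars (nv : List String × PySem.Set String) (v : String) :
    ((stepL nv v).1 = nv.1 ∧ (stepL nv v).2 = nv.2 ∧ v ∈ nv.2)
    ∨ ((stepL nv v).1 = nv.1 ++ [v] ∧ (stepL nv v).2 = nv.2 ++ [v] ∧ v ∉ nv.2) := by
  unfold stepL
  by_cases h : v ∈ nv.2
  · left; simp [PySem.Set.contains_eq_listContains, h]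
  · right
    simp [PySem.Set.contains_eq_listContains, h]

-- folding stepL over a word list: full characterisation of the resulting state
theorem foldl_stepL_chars (ws : List String) :
    ∀ (nxt : List String) (vis : PySem.Set String), (∀ x ∈ nxt, x ∈ vis) →
      (∀ v, v ∈ (ws.foldl stepL (nxt, vis)).1 ↔ v ∈ nxt ∨ (v ∈ ws ∧ v ∉ vis))
      ∧ (∀ v, (v : String) ∈ ((ws.foldl stepL (nxt, vis)).2 : List String) ↔ v ∈ vis ∨ v ∈ ws)
      ∧ (∀ x ∈ (ws.foldl stepL (nxt, vis)).1, x ∈ (ws.foldl stepL (nxt, vis)).2)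
      ∧ (nxt.Nodup → (ws.foldl stepL (nxt, vis)).1.Nodup)
      ∧ (∃ post, (ws.foldl stepL (nxt, vis)).1 = nxt ++ post) := by
  induction ws with
  | nil =>
    intro nxt vis hsub
    refine ⟨by simp, by simp, hsub, fun h => h, [], by simp⟩
  | cons w ws ih =>
    intro nxt vis hsub
    simp only [List.foldl_cons]
    rcases stepL_chars (nxt, vis) w with ⟨h1, h2, hw⟩ | ⟨h1, h2, hw⟩
    · simp only at h1 h2 hw
      rw [show stepL (nxt, vis) w = (nxt, vis) from Prod.ext h1 h2]
      obtain ⟨m1, m2, m3, m4, m5⟩ := ih nxt vis hsub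
      refine ⟨fun v => ?_, fun v => ?_, m3, m4, m5⟩
      · rw [m1 v]
        simp only [List.mem_cons]
        have hv := hsub v
        by_cases hvw : v = w
        · subst hvw; tauto
        · tauto
      · rw [m2 v]
        simp only [List.mem_cons]
        by_cases hvw : v = w
        · subst hvw; tauto
        · tauto
    · simp only at h1 h2 hw
      rw [show stepL (nxt, vis) w = (nxt ++ [w], vis ++ [w]) from Prod.ext h1 h2]
      have hsub' : ∀ x ∈ nxt ++ [w], x ∈ ((vis ++ [w] : List String)) := by
        intro x hx
        rcases List.mem_append.mp hx with h | h
        · exact List.mem_append.mpr (Or.inl (hsub x h))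
        · exact List.mem_append.mpr (Or.inr h)
      obtain ⟨m1, m2, m3, m4, m5⟩ := ih (nxt ++ [w]) (vis ++ [w]) hsub'
      refine ⟨fun v => ?_, fun v => ?_, m3, fun hnd => ?_, ?_⟩
      · rw [m1 v]
        simp only [List.mem_append, List.mem_cons, List.not_mem_nil, or_false]
        have hv := hsub v
        by_cases hvw : v = w
        · subst hvw; tauto
        · tauto
      · rw [m2 v]
        simp only [List.mem_append, List.mem_cons, List.not_mem_nil, or_false]
        by_cases hvw : v = w
        · subst hvw; tauto
        · tauto
      · refine m4 ?_
        refine List.Nodup.append hnd (by simp) ?_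
        intro x hx hx'
        rcases List.mem_singleton.mp hx' with rfl
        exact hw (hsub x hx)
      · rcases m5 with ⟨post, hpost⟩
        exact ⟨w :: post, by simpa [List.append_assoc] using hpost⟩

-- folding expandL over the whole frontier
theorem foldl_expandL_chars (g : PySem.Dict String (List String))
    (edges : List (String × String))
    (hg : ∀ u v, v ∈ g.getD u [] ↔ relB edges u v = true) (cur : List String) :
    ∀ (nxt : List String) (vis : PySem.Set String), (∀ x ∈ nxt, x ∈ vis) →
      (∀ v, v ∈ (cur.foldl (expandL g) (nxt, vis)).1 ↔
          v ∈ nxt ∨ ((∃ u ∈ cur, relB edges u v = true) ∧ v ∉ vis))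
      ∧ (∀ v, (v : String) ∈ ((cur.foldl (expandL g) (nxt, vis)).2 : List String) ↔
          v ∈ vis ∨ ∃ u ∈ cur, relB edges u v = true)
      ∧ (∀ x ∈ (cur.foldl (expandL g) (nxt, vis)).1, x ∈ (cur.foldl (expandL g) (nxt, vis)).2)
      ∧ (nxt.Nodup → (cur.foldl (expandL g) (nxt, vis)).1.Nodup)
      ∧ (∃ post, (cur.foldl (expandL g) (nxt, vis)).1 = nxt ++ post) := by
  induction cur with
  | nil =>
    intro nxt vis hsub
    refine ⟨by simp, by simp, hsub, fun h => h, [], by simp⟩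
  | cons c cur ih =>
    intro nxt vis hsub
    simp only [List.foldl_cons]
    obtain ⟨s1, s2, s3, s4, s5⟩ := foldl_stepL_chars (g.getD c []) nxt vis hsub
    have hmid : expandL g (nxt, vis) c = (g.getD c []).foldl stepL (nxt, vis) := rfl
    rw [hmid]
    obtain ⟨m1, m2, m3, m4, m5⟩ := ih _ _ s3
    refine ⟨fun v => ?_, fun v => ?_, m3, fun hnd => m4 (s4 hnd), ?_⟩
    · rw [m1 v, s1 v, s2 v]
      have hgc := hg c v
      constructor
      · rintro ((h | ⟨h, hnv⟩) | ⟨⟨u, hu, hrel⟩, hnv⟩)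
        · exact Or.inl h
        · exact Or.inr ⟨⟨c, by simp, hgc.mp h⟩, hnv⟩
        · rcases not_or.mp hnv with ⟨hnv1, _⟩
          exact Or.inr ⟨⟨u, by simp [hu], hrel⟩, hnv1⟩
      · rintro (h | ⟨⟨u, hu, hrel⟩, hnv⟩)
        · exact Or.inl (Or.inl h)
        · rcases List.mem_cons.mp hu with rfl | hu
          · exact Or.inl (Or.inr ⟨hgc.mpr hrel, hnv⟩)
          · by_cases hcv : v ∈ g.getD c []
            · exact Or.inl (Or.inr ⟨hcv, hnv⟩)
            · refine Or.inr ⟨⟨u, hu, hrel⟩, ?_⟩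
              rintro (h | h)
              · exact hnv h
              · exact hcv h
    · rw [m2 v, s2 v]
      constructor
      · rintro ((h | h) | ⟨u, hu, hrel⟩)
        · exact Or.inl h
        · exact Or.inr ⟨c, by simp, (hg c v).mp h⟩
        · exact Or.inr ⟨u, by simp [hu], hrel⟩
      · rintro (h | ⟨u, hu, hrel⟩)
        · exact Or.inl (Or.inl h)
        · rcases List.mem_cons.mp hu with rfl | hu
          · exact Or.inl (Or.inr ((hg u v).mpr hrel))
          · exact Or.inr ⟨u, hu, hrel⟩
    · rcases s5 with ⟨p1, hp1⟩
      rcases m5 with ⟨p2, hp2⟩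
      exact ⟨p1 ++ p2, by rw [hp2, hp1, List.append_assoc]⟩

-- levelL: early return exactly when dst is in the frontier
theorem levelL_found (g : PySem.Dict String (List String)) (dst : String) (d : Int) :
    ∀ (cur : List String) (f : Nat) (nxt : List String) (vis : PySem.Set String),
      dst ∈ cur → cur.length ≤ f →
      levelL g dst d f cur nxt vis = Sum.inl (some d) := by
  intro cur
  induction cur with
  | nil => intro f nxt vis h; simp at h
  | cons c cur ih =>
    intro f nxt vis hmem hlen
    cases f with
    | zero => simp at hlen
    | succ f =>
      simp only [levelL]
      by_cases hc : c = dst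
      · simp [hc]
      · rcases List.mem_cons.mp hmem with rfl | hmem
        · exact absurd rfl hc
        · simp only [hc, if_false]
          exact ih f _ _ hmem (by simpa using Nat.le_of_succ_le_succ hlen)

theorem levelL_notfound (g : PySem.Dict String (List String)) (dst : String) (d : Int) :
    ∀ (cur : List String) (f : Nat) (nxt : List String) (vis : PySem.Set String),
      dst ∉ cur → cur.length ≤ f →
      levelL g dst d f cur nxt vis
        = Sum.inr (f - cur.length, (cur.foldl (expandL g) (nxt, vis)).1,
            (cur.foldl (expandL g) (nxt, vis)).2) := by
  intro cur
  induction cur with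
  | nil => intro f nxt vis _ _; simp [levelL]
  | cons c cur ih =>
    intro f nxt vis hmem hlen
    cases f with
    | zero => simp at hlen
    | succ f =>
      have hc : c ≠ dst := fun h => hmem (by simp [h])
      simp only [levelL, hc, if_false, List.foldl_cons]
      rw [ih f _ _ (fun h => hmem (by simp [h])) (by simpa using Nat.le_of_succ_le_succ hlen)]
      rw [List.length_cons, Nat.succ_sub_succ]
      rfl

-- the BFS invariant, pushed through the whole loop
theorem goL_correct (edges : List (String × String)) (src dst : String)
    (g : PySem.Dict String (List String))
    (hg : ∀ u v, v ∈ g.getD u [] ↔ relB edges u v = true) :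
    ∀ (f : Nat) (F : List String) (V : PySem.Set String) (k : Nat),
      (∀ v, v ∈ F ↔ Lb edges src k v = true) →
      (∀ v, (v : String) ∈ (V : List String) ↔ ballB edges src k v = true) →
      F.Nodup →
      (∀ j < k, ballB edges src j dst = false) →
      ((nodesList edges src).toFinset \ (V : List String).toFinset).card + F.length < f →
      goL g dst f F V (k : Int) = distFrom edges src dst k := by
  intro f
  induction f using Nat.strong_induction_on with
  | _ f IH =>
    intro F V k hF hV hnd hdst hfuel
    cases F with
    | nil =>
      -- frontier empty: the balls have stabilised and dst was never reached
      have h0 : goL g dst f [] V (k : Int) = none := by rw [goL]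
      rw [h0]
      have hstab : ∀ j v, ballB edges src (k + j) v = true → ballB edges src k v = true := by
        intro j
        induction j with
        | zero => intro v h; exact h
        | succ j ihj =>
          intro v h
          rw [show k + (j + 1) = (k + j) + 1 by omega] at h
          rcases (L_step ..).mp h with h | ⟨u, hu, hrel⟩
          · exact ihj v h
          · exfalso
            have hku : ballB edges src k u = true := by
              cases j with
              | zero => exact Lb_ball _ _ _ _ hu
              | succ j =>
                have hbu := Lb_ball _ _ _ _ hu
                exact ihj u (by rwa [show k + (j+1) = k + j + 1 by omega] at hbu ⊢)
            -- u is at level k+j but already in ball k: contradiction with Lb for j ≥ 1,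
            -- and for j = 0 with the empty frontier
            cases j with
            | zero =>
              have := (hF u).mpr hu
              simp at this
            | succ j =>
              have hthis : ballB edges src (k + j) u = true :=
                ball_mono edges src (by omega) hku
              have hLb := hu
              rw [show k + (j + 1) = (k + j) + 1 by omega] at hLb
              simp only [Lb, Bool.and_eq_true, Bool.not_eq_true'] at hLb
              rw [hLb.2] at hthis
              cases hthis
      have hnone : ¬ ∃ j, ballB edges src (k + j) dst = true := by
        rintro ⟨j, hj⟩
        have hk := hstab j dst hj
        have : Lb edges src k dst = true := ball_of_Lb_false _ _ _ _ hk hdst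
        have := (hF dst).mpr this
        simp at this
      rw [distFrom, dif_neg hnone]
    | cons c F' =>
      set F := c :: F' with hFdef
      have hlenle : F.length ≤ f := le_of_lt (lt_of_le_of_lt (Nat.le_add_left _ _) hfuel)
      have hFpos : 0 < F.length := by simp [hFdef]
      rw [goL_cons]
      by_cases hmem : dst ∈ F
      · rw [levelL_found g dst (k : Int) F f [] V hmem hlenle]
        have hLdst : Lb edges src k dst = true := (hF dst).mp hmem
        exact (distFrom_here edges src dst k (Lb_ball _ _ _ _ hLdst)).symm
      · rw [levelL_notfound g dst (k : Int) F f [] V hmem hlenle]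
        have hkdst : ballB edges src k dst = false := by
          by_cases h : ballB edges src k dst = true
          · exact absurd ((hF dst).mpr (ball_of_Lb_false _ _ _ _ h hdst)) hmem
          · simpa using h
        obtain ⟨m1, m2, m3, m4, m5⟩ :=
          foldl_expandL_chars g edges hg F [] V (by simp)
        set F2 := (F.foldl (expandL g) ([], V)).1
        set V2 := (F.foldl (expandL g) ([], V)).2
        -- next frontier is exactly level k+1, next visited exactly ball k+1
        have hF2 : ∀ v, v ∈ F2 ↔ Lb edges src (k + 1) v = true := by
          intro v
          rw [m1 v]
          simp only [List.not_mem_nil, false_or]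
          constructor
          · rintro ⟨⟨u, hu, hrel⟩, hnv⟩
            have hnb : ballB edges src k v = false := by
              by_cases h : ballB edges src k v = true
              · exact absurd ((hV v).mpr h) hnv
              · simpa using h
            have hb : ballB edges src (k + 1) v = true :=
              (L_step ..).mpr (Or.inr ⟨u, (hF u).mp hu, hrel⟩)
            simp [Lb, hb, hnb]
          · intro hL
            have hb := (Bool.and_eq_true .. |>.mp hL).1
            have hnb := (Bool.and_eq_true .. |>.mp hL).2
            rcases (L_step ..).mp hb with h | ⟨u, hu, hrel⟩
            · simp [h] at hnb
            · refine ⟨⟨u, (hF u).mpr hu, hrel⟩, fun hv => ?_⟩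
              have := (hV v).mp hv
              simp [this] at hnb
        have hV2 : ∀ v, (v : String) ∈ (V2 : List String) ↔ ballB edges src (k+1) v = true := by
          intro v
          rw [m2 v]
          rw [L_step]
          constructor
          · rintro (h | ⟨u, hu, hrel⟩)
            · exact Or.inl ((hV v).mp h)
            · exact Or.inr ⟨u, (hF u).mp hu, hrel⟩
          · rintro (h | ⟨u, hu, hrel⟩)
            · exact Or.inl ((hV v).mpr h)
            · exact Or.inr ⟨u, (hF u).mpr hu, hrel⟩
        have hdst' : ∀ j < k + 1, ballB edges src j dst = false := by
          intro j hj
          rcases Nat.lt_or_ge j k with h | h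
          · exact hdst j h
          · have : j = k := by omega
            subst this; exact hkdst
        -- cardinality bookkeeping for the fuel
        have hF2nodes : ∀ v ∈ F2, v ∈ (nodesList edges src).toFinset \ (V : List String).toFinset := by
          intro v hv
          rcases (m1 v).mp hv with h | ⟨⟨u, _, hrel⟩, hnv⟩
          · simp at h
          · simp only [Finset.mem_sdiff, List.mem_toFinset]
            exact ⟨rel_mem_nodes edges src hrel, hnv⟩
        have hF2nd : F2.Nodup := m4 (by simp)
        have hcard : ((nodesList edges src).toFinset \ (V2 : List String).toFinset).card
            = ((nodesList edges src).toFinset \ (V : List String).toFinset).card - F2.length := by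
          have hsplit : (nodesList edges src).toFinset \ (V : List String).toFinset
              = ((nodesList edges src).toFinset \ (V2 : List String).toFinset) ∪ F2.toFinset := by
            ext v
            simp only [Finset.mem_sdiff, Finset.mem_union, List.mem_toFinset]
            constructor
            · rintro ⟨hn, hv⟩
              by_cases h2 : v ∈ (V2 : List String)
              · right
                rcases (m2 v).mp h2 with h | ⟨u, hu, hrel⟩
                · exact absurd h hv
                · exact (m1 v).mpr (Or.inr ⟨⟨u, hu, hrel⟩, hv⟩)
              · exact Or.inl ⟨hn, h2⟩
            · rintro (⟨hn, hv⟩ | hv)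
              · refine ⟨hn, fun hvv => hv ((m2 v).mpr (Or.inl hvv))⟩
              · have := hF2nodes v hv
                simp only [Finset.mem_sdiff, List.mem_toFinset] at this
                exact this
          have hdisj : Disjoint ((nodesList edges src).toFinset \ (V2 : List String).toFinset)
              F2.toFinset := by
            rw [Finset.disjoint_left]
            intro v hv hv2
            simp only [Finset.mem_sdiff, List.mem_toFinset] at hv
            exact hv.2 (m3 v (List.mem_toFinset.mp hv2))
          have hcards := congrArg Finset.card hsplit
          rw [Finset.card_union_of_disjoint hdisj, List.toFinset_card_of_nodup hF2nd] at hcards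
          omega
        have hlenF2 : F2.length ≤ ((nodesList edges src).toFinset \ (V : List String).toFinset).card := by
          rw [← List.toFinset_card_of_nodup hF2nd]
          exact Finset.card_le_card (fun v hv => hF2nodes v (List.mem_toFinset.mp hv))
        have hrec : goL g dst (f - F.length) F2 V2 ((k : Int) + 1)
            = distFrom edges src dst (k + 1) := by
          rw [show ((k : Int) + 1) = ((k + 1 : Nat) : Int) by push_cast; ring]
          exact IH (f - F.length) (by omega) F2 V2 (k + 1) hF2 hV2 hF2nd hdst' (by omega)
        show goL g dst (f - F.length) F2 V2 ((k : Int) + 1) = distFrom edges src dst k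
        rw [hrec, distFrom_shift edges src dst k hkdst]

-- A computes distFrom 0
theorem shortest_neighbour_eq_distFrom (edges : List (String × String)) (src dst : String) :
    shortest_neighbour edges src dst = distFrom edges src dst 0 := by
  have hsetsrc : ((PySem.Set.add PySem.Set.empty src : PySem.Set String) : List String)
      = [src] := rfl
  have hcard : ((nodesList edges src).toFinset \ ([src] : List String).toFinset).card
      ≤ 2 * edges.length := by
    have hsub : (nodesList edges src).toFinset \ ([src] : List String).toFinset
        ⊆ (edges.flatMap (fun p => [p.1, p.2])).toFinset := by
      intro v hv
      simp only [Finset.mem_sdiff, List.mem_toFinset, nodesList, List.mem_cons] at hv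
      rcases hv.1 with h | h
      · exact absurd (by simp [h]) hv.2
      · exact List.mem_toFinset.mpr h
    calc ((nodesList edges src).toFinset \ ([src] : List String).toFinset).card
        ≤ (edges.flatMap (fun p => [p.1, p.2])).toFinset.card := Finset.card_le_card hsub
      _ ≤ (edges.flatMap (fun p => [p.1, p.2])).length := List.toFinset_card_le _
      _ = 2 * edges.length := by
          have := length_nodesList edges src
          simp only [nodesList, List.length_cons] at this
          omega
  have hL : goL (create_graph edges) dst (2 * edges.length + 2) [src]
      (PySem.Set.add PySem.Set.empty src) ((0 : Nat) : Int) = distFrom edges src dst 0 := by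
    apply goL_correct edges src dst (create_graph edges) (mem_create_graph_getD edges)
    · intro v
      show v ∈ [src] ↔ (v == src) = true
      simp
    · intro v
      rw [hsetsrc]
      show v ∈ [src] ↔ (v == src) = true
      simp
    · simp
    · intro j hj; omega
    · rw [hsetsrc]
      simp only [List.length_cons, List.length_nil]
      omega
  unfold shortest_neighbour
  have h := main_sim (create_graph edges) dst (2 * edges.length + 2) [src] []
      (PySem.Set.add PySem.Set.empty src) 0
  simp only [List.map_cons, List.map_nil, List.append_nil] at h
  rw [h, ← goL_cons (create_graph edges) dst (2 * edges.length + 2) src []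
    (PySem.Set.add PySem.Set.empty src) 0]
  simpa using hL

----------------------------------------------------------------------------------------------
-- Part 4: correctness of the Bellman-Ford relaxation.
----------------------------------------------------------------------------------------------

-- the break never changes the result: bfRounds is plain iteration of one full pass
def round1 (edges : List (String × String)) (d : PySem.Dict String Int) :
    PySem.Dict String Int :=
  (edges.foldl relaxB (d, false)).1

def roundsIter (edges : List (String × String)) :
    Nat → PySem.Dict String Int → PySem.Dict String Int
  | 0, d => d
  | k + 1, d => roundsIter edges k (round1 edges d)

theorem relax1_cases (d : PySem.Dict String Int) (x y : String) :
    (d.get? x = none ∧ relax1 d x y = (d, false))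
    ∨ (∃ dx, d.get? x = some dx ∧ d.get? y = none ∧ relax1 d x y = (d.insert y (dx + 1), true))
    ∨ (∃ dx dy, d.get? x = some dx ∧ d.get? y = some dy ∧ dx + 1 < dy ∧
        relax1 d x y = (d.insert y (dx + 1), true))
    ∨ (∃ dx dy, d.get? x = some dx ∧ d.get? y = some dy ∧ ¬ dx + 1 < dy ∧
        relax1 d x y = (d, false)) := by
  unfold relax1
  rcases h1 : d.get? x with _ | dx
  · exact Or.inl ⟨rfl, rfl⟩
  · rcases h2 : d.get? y with _ | dy
    · exact Or.inr (Or.inl ⟨dx, rfl, rfl, rfl⟩)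
    · by_cases hc : dx + 1 < dy
      · exact Or.inr (Or.inr (Or.inl ⟨dx, dy, rfl, rfl, hc, by simp [hc]⟩))
      · exact Or.inr (Or.inr (Or.inr ⟨dx, dy, rfl, rfl, hc, by simp [hc]⟩))

theorem relax1_flag_false (d : PySem.Dict String Int) (x y : String)
    (h : (relax1 d x y).2 = false) : (relax1 d x y).1 = d := by
  rcases relax1_cases d x y with ⟨_, he⟩ | ⟨dx, _, _, he⟩ | ⟨dx, dy, _, _, _, he⟩
    | ⟨dx, dy, _, _, _, he⟩
  · rw [he]
  · rw [he] at h; cases h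
  · rw [he] at h; cases h
  · rw [he]

theorem relaxB_eq (s : PySem.Dict String Int × Bool) (p : String × String) :
    relaxB s p = ((relax1 (relax1 s.1 p.1 p.2).1 p.2 p.1).1,
      s.2 || (relax1 s.1 p.1 p.2).2 || (relax1 (relax1 s.1 p.1 p.2).1 p.2 p.1).2) := rfl

theorem relaxB_flag_false (s : PySem.Dict String Int × Bool) (p : String × String)
    (h : (relaxB s p).2 = false) : relaxB s p = s := by
  rw [relaxB_eq] at h ⊢
  simp only [Bool.or_eq_false_iff] at h
  obtain ⟨⟨hs, h1⟩, h2⟩ := h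
  have e1 : (relax1 s.1 p.1 p.2).1 = s.1 := relax1_flag_false _ _ _ h1
  rw [e1] at h2 ⊢
  have e2 : (relax1 s.1 p.2 p.1).1 = s.1 := relax1_flag_false _ _ _ h2
  rw [e2, h1, h2, hs]
  simp only [Bool.or_false]
  rw [← hs]

theorem foldl_relaxB_flag (l : List (String × String)) :
    ∀ (s : PySem.Dict String Int × Bool), s.2 = true → (l.foldl relaxB s).2 = true := by
  induction l with
  | nil => intro s h; exact h
  | cons p l ih =>
    intro s h
    simp only [List.foldl_cons]
    exact ih _ (by rw [relaxB_eq]; simp [h])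

theorem foldl_relaxB_flag_false (l : List (String × String)) :
    ∀ (s : PySem.Dict String Int × Bool), (l.foldl relaxB s).2 = false → l.foldl relaxB s = s := by
  induction l with
  | nil => intro s _; rfl
  | cons p l ih =>
    intro s h
    simp only [List.foldl_cons] at h ⊢
    have hflag : (relaxB s p).2 = false := by
      by_contra hc
      have := foldl_relaxB_flag l (relaxB s p) (by simpa using hc)
      rw [this] at h
      cases h
    rw [relaxB_flag_false s p hflag] at h ⊢
    exact ih s h

theorem round1_id_of_flag (edges : List (String × String)) (d : PySem.Dict String Int)
    (h : (edges.foldl relaxB (d, false)).2 = false) : round1 edges d = d := by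
  unfold round1
  rw [foldl_relaxB_flag_false edges (d, false) h]

theorem roundsIter_fixed (edges : List (String × String)) (d : PySem.Dict String Int)
    (h : round1 edges d = d) : ∀ k, roundsIter edges k d = d := by
  intro k
  induction k with
  | zero => rfl
  | succ k ih => simp only [roundsIter, h, ih]

theorem bfRounds_eq_roundsIter (edges : List (String × String)) :
    ∀ (k : Nat) (d : PySem.Dict String Int), bfRounds edges k d = roundsIter edges k d := by
  intro k
  induction k with
  | zero => intro d; rfl
  | succ k ih =>
    intro d
    simp only [bfRounds, roundsIter]
    by_cases h : (edges.foldl relaxB (d, false)).2 = true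
    · rw [if_pos h, ih]
      rfl
    · have h' : (edges.foldl relaxB (d, false)).2 = false := by simpa using h
      have hid : round1 edges d = d := round1_id_of_flag edges d h'
      rw [if_neg (by simp [h']), hid, roundsIter_fixed edges d hid k,
        foldl_relaxB_flag_false edges (d, false) h']

-- soundness: every recorded distance is realised by the balls
def Sound (edges : List (String × String)) (src : String) (d : PySem.Dict String Int) : Prop :=
  ∀ v m, d.get? v = some m → ∃ k : Nat, m = (k : Int) ∧ ballB edges src k v = true

-- monotone refinement: present keys stay present with a value no larger
def DLe (d d' : PySem.Dict String Int) : Prop :=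
  ∀ v m, d.get? v = some m → ∃ m', d'.get? v = some m' ∧ m' ≤ m

theorem DLe_refl (d : PySem.Dict String Int) : DLe d d := fun _ m h => ⟨m, h, le_refl m⟩

theorem DLe_trans {a b c : PySem.Dict String Int} (h1 : DLe a b) (h2 : DLe b c) : DLe a c := by
  intro v m h
  obtain ⟨m', hm', hle⟩ := h1 v m h
  obtain ⟨m'', hm'', hle'⟩ := h2 v m' hm'
  exact ⟨m'', hm'', le_trans hle' hle⟩

theorem dict_insert_DLe (d : PySem.Dict String Int) (y : String) (w : Int)
    (hw : d.get? y = none ∨ ∃ old, d.get? y = some old ∧ w ≤ old) : DLe d (d.insert y w) := by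
  intro v m hv
  by_cases hvy : v = y
  · subst hvy
    rcases hw with h | ⟨old, hold, hle⟩
    · rw [h] at hv; cases hv
    · rw [hold] at hv; cases hv
      exact ⟨w, PySem.Dict.get?_insert_self .., hle⟩
  · exact ⟨m, by rw [PySem.Dict.get?_insert_of_ne _ _ hvy]; exact hv, le_refl m⟩

theorem relax1_DLe (d : PySem.Dict String Int) (x y : String) : DLe d (relax1 d x y).1 := by
  rcases relax1_cases d x y with ⟨h1, he⟩ | ⟨dx, h1, h2, he⟩ | ⟨dx, dy, h1, h2, hc, he⟩
    | ⟨dx, dy, h1, h2, hc, he⟩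
  · rw [he]; exact DLe_refl d
  · rw [he]; exact dict_insert_DLe d y (dx + 1) (Or.inl h2)
  · rw [he]; exact dict_insert_DLe d y (dx + 1) (Or.inr ⟨dy, h2, by omega⟩)
  · rw [he]; exact DLe_refl d

theorem relaxB_DLe (s : PySem.Dict String Int × Bool) (p : String × String) :
    DLe s.1 (relaxB s p).1 := by
  rw [relaxB_eq]
  exact DLe_trans (relax1_DLe s.1 p.1 p.2) (relax1_DLe (relax1 s.1 p.1 p.2).1 p.2 p.1)

theorem foldl_relaxB_DLe (l : List (String × String)) :
    ∀ (s : PySem.Dict String Int × Bool), DLe s.1 (l.foldl relaxB s).1 := by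
  induction l with
  | nil => intro s; exact DLe_refl _
  | cons p l ih =>
    intro s
    simp only [List.foldl_cons]
    exact DLe_trans (relaxB_DLe s p) (ih (relaxB s p))

theorem relax1_Sound (edges : List (String × String)) (src : String)
    (d : PySem.Dict String Int) (x y : String) (hrel : relB edges x y = true)
    (hs : Sound edges src d) : Sound edges src (relax1 d x y).1 := by
  have hins : ∀ dx, d.get? x = some dx → Sound edges src (d.insert y (dx + 1)) := by
    intro dx hdx v m hv
    by_cases hvy : v = y
    · subst hvy
      rw [PySem.Dict.get?_insert_self] at hv
      cases hv
      obtain ⟨k, hk, hb⟩ := hs x dx hdx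
      refine ⟨k + 1, by rw [hk]; push_cast; ring, ?_⟩
      exact (ball_succ_iff ..).mpr (Or.inr ⟨x, hb, hrel⟩)
    · rw [PySem.Dict.get?_insert_of_ne _ _ hvy] at hv
      exact hs v m hv
  rcases relax1_cases d x y with ⟨h1, he⟩ | ⟨dx, h1, h2, he⟩ | ⟨dx, dy, h1, h2, hc, he⟩
    | ⟨dx, dy, h1, h2, hc, he⟩
  · rw [he]; exact hs
  · rw [he]; exact hins dx h1
  · rw [he]; exact hins dx h1
  · rw [he]; exact hs

theorem relaxB_Sound (edges : List (String × String)) (src : String)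
    (s : PySem.Dict String Int × Bool) (p : String × String) (hp : p ∈ edges)
    (hs : Sound edges src s.1) : Sound edges src (relaxB s p).1 := by
  have hrel12 : relB edges p.1 p.2 = true := by
    simp only [relB, List.any_eq_true]
    exact ⟨p, hp, by simp⟩
  have hrel21 : relB edges p.2 p.1 = true := by rw [relB_comm]; exact hrel12
  rw [relaxB_eq]
  exact relax1_Sound edges src _ p.2 p.1 hrel21 (relax1_Sound edges src s.1 p.1 p.2 hrel12 hs)

theorem foldl_relaxB_Sound (edges : List (String × String)) (src : String)
    (l : List (String × String)) (hl : ∀ p ∈ l, p ∈ edges) :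
    ∀ (s : PySem.Dict String Int × Bool), Sound edges src s.1 →
      Sound edges src (l.foldl relaxB s).1 := by
  induction l with
  | nil => intro s h; exact h
  | cons p l ih =>
    intro s h
    simp only [List.foldl_cons]
    exact ih (fun q hq => hl q (by simp [hq])) _
      (relaxB_Sound edges src s p (hl p (by simp)) h)

theorem relax1_establishes (d : PySem.Dict String Int) (x y : String)
    (mx : Int) (hmx : d.get? x = some mx) :
    ∃ my, (relax1 d x y).1.get? y = some my ∧ my ≤ mx + 1 := by
  rcases relax1_cases d x y with ⟨h1, he⟩ | ⟨dx, h1, h2, he⟩ | ⟨dx, dy, h1, h2, hc, he⟩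
    | ⟨dx, dy, h1, h2, hc, he⟩
  · rw [h1] at hmx; cases hmx
  · rw [he]
    rw [h1] at hmx; cases hmx
    exact ⟨mx + 1, PySem.Dict.get?_insert_self .., le_refl _⟩
  · rw [he]
    rw [h1] at hmx; cases hmx
    exact ⟨mx + 1, PySem.Dict.get?_insert_self .., le_refl _⟩
  · rw [he]
    rw [h1] at hmx; cases hmx
    exact ⟨dy, h2, by omega⟩

theorem relaxB_establishes (s : PySem.Dict String Int × Bool) (p : String × String)
    (u v : String) (huv : (p.1 = u ∧ p.2 = v) ∨ (p.1 = v ∧ p.2 = u))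
    (mu : Int) (hmu : s.1.get? u = some mu) :
    ∃ mv, (relaxB s p).1.get? v = some mv ∧ mv ≤ mu + 1 := by
  rw [relaxB_eq]
  rcases huv with ⟨h1, h2⟩ | ⟨h1, h2⟩
  · -- p = (u, v): the first stage relaxes u → v, the second can only refine
    rw [h1, h2]
    obtain ⟨mv, hmv, hle⟩ := relax1_establishes s.1 u v mu hmu
    obtain ⟨mv', hmv', hle'⟩ := relax1_DLe (relax1 s.1 u v).1 v u v mv hmv
    exact ⟨mv', hmv', by omega⟩
  · -- p = (v, u): the second stage relaxes u → v
    rw [h1, h2]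
    obtain ⟨mu', hmu', hleu⟩ := relax1_DLe s.1 v u u mu hmu
    obtain ⟨mv, hmv, hlev⟩ := relax1_establishes (relax1 s.1 v u).1 u v mu' hmu'
    exact ⟨mv, hmv, by omega⟩

-- completeness advances one level per round
def Complete (edges : List (String × String)) (src : String) (k : Nat)
    (d : PySem.Dict String Int) : Prop :=
  ∀ v j, j ≤ k → ballB edges src j v = true → ∃ m, d.get? v = some m ∧ m ≤ (j : Int)

theorem Complete_of_DLe (edges : List (String × String)) (src : String) (k : Nat)
    {d d' : PySem.Dict String Int} (h : Complete edges src k d) (hle : DLe d d') :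
    Complete edges src k d' := by
  intro v j hj hb
  obtain ⟨m, hm, hle'⟩ := h v j hj hb
  obtain ⟨m', hm', hle''⟩ := hle v m hm
  exact ⟨m', hm', le_trans hle'' hle'⟩

theorem round1_Complete (edges : List (String × String)) (src : String) (k : Nat)
    (d : PySem.Dict String Int) (hC : Complete edges src k d) :
    Complete edges src (k + 1) (round1 edges d) := by
  have hDLe : DLe d (round1 edges d) := foldl_relaxB_DLe edges (d, false)
  intro v j hj hb
  rcases Nat.lt_or_ge j (k + 1) with h | h
  · exact Complete_of_DLe edges src k hC hDLe v j (by omega) hb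
  · have hjk : j = k + 1 := by omega
    subst hjk
    rcases (L_step ..).mp hb with h | ⟨u, hu, hrel⟩
    · obtain ⟨m, hm, hle⟩ := Complete_of_DLe edges src k hC hDLe v k (le_refl k) h
      exact ⟨m, hm, by push_cast; omega⟩
    · -- u at level k, some edge joins u and v
      have hbu : ballB edges src k u = true := Lb_ball _ _ _ _ hu
      obtain ⟨mu, hmu, hmule⟩ := hC u k (le_refl k) hbu
      have hedge : ∃ p ∈ edges, (p.1 = u ∧ p.2 = v) ∨ (p.1 = v ∧ p.2 = u) := by
        simp only [relB, List.any_eq_true, Bool.or_eq_true, Bool.and_eq_true, beq_iff_eq] at hrel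
        rcases hrel with ⟨p, hp, ⟨ha, hb'⟩ | ⟨ha, hb'⟩⟩
        · exact ⟨p, hp, Or.inl ⟨ha, hb'⟩⟩
        · exact ⟨p, hp, Or.inr ⟨ha, hb'⟩⟩
      obtain ⟨p, hp, hpv⟩ := hedge
      obtain ⟨l1, l2, rfl⟩ := List.append_of_mem hp
      unfold round1
      rw [List.foldl_append, List.foldl_cons]
      set s1 := l1.foldl relaxB (d, false) with hs1
      obtain ⟨mu', hmu', hleu⟩ := foldl_relaxB_DLe l1 (d, false) u mu hmu
      obtain ⟨mv, hmv, hlev⟩ := relaxB_establishes s1 p u v hpv mu' hmu'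
      obtain ⟨mv', hmv', hlev'⟩ := foldl_relaxB_DLe l2 (relaxB s1 p) v mv hmv
      refine ⟨mv', hmv', ?_⟩
      push_cast
      omega

theorem roundsIter_Sound_Complete (edges : List (String × String)) (src : String) :
    ∀ (k : Nat) (j : Nat) (d : PySem.Dict String Int),
      Sound edges src d → Complete edges src j d →
      Sound edges src (roundsIter edges k d) ∧ Complete edges src (j + k) (roundsIter edges k d) := by
  intro k
  induction k with
  | zero => intro j d hS hC; exact ⟨hS, hC⟩
  | succ k ih =>
    intro j d hS hC
    simp only [roundsIter]
    have hS' : Sound edges src (round1 edges d) :=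
      foldl_relaxB_Sound edges src edges (fun p hp => hp) (d, false) hS
    have hC' : Complete edges src (j + 1) (round1 edges d) :=
      round1_Complete edges src j d hC
    have := ih (j + 1) (round1 edges d) hS' hC'
    exact ⟨this.1, by rw [show j + (k + 1) = (j + 1) + k by omega]; exact this.2⟩

----------------------------------------------------------------------------------------------
-- Part 5: the least distance is at most 2·|edges| (strict ball growth).
----------------------------------------------------------------------------------------------

theorem ball_congr (edges : List (String × String)) (src : String) (a b : Nat)
    (h : ∀ v, ballB edges src a v = ballB edges src b v) :
    ∀ v, ballB edges src (a + 1) v = ballB edges src (b + 1) v := by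
  intro v
  simp only [ballB, h]

theorem ball_stab (edges : List (String × String)) (src : String) (i : Nat)
    (h : ∀ v, ballB edges src (i + 1) v = ballB edges src i v) :
    ∀ j v, ballB edges src (i + j) v = ballB edges src i v := by
  intro j
  induction j with
  | zero => intro v; rfl
  | succ j ih =>
    intro v
    rw [show i + (j + 1) = (i + j) + 1 by omega]
    rw [ball_congr edges src (i + j) i ih v, h v]

theorem find_le_bound (edges : List (String × String)) (src dst : String)
    (h : ∃ j, ballB edges src j dst = true) : Nat.find h ≤ 2 * edges.length := by
  by_contra hc
  rw [not_le] at hc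
  set j0 := Nat.find h with hj0
  -- the filtered node finsets grow strictly at every step below j0
  have hstrict : ∀ i, i < j0 →
      ((nodesList edges src).toFinset.filter (fun v => ballB edges src i v = true)).card + 1
        ≤ ((nodesList edges src).toFinset.filter (fun v => ballB edges src (i + 1) v = true)).card := by
    intro i hi
    have hgrow : ∃ v, ballB edges src (i + 1) v = true ∧ ballB edges src i v = false := by
      by_contra hg
      rw [not_exists] at hg
      simp only [not_and, Bool.not_eq_false] at hg
      have heq : ∀ v, ballB edges src (i + 1) v = ballB edges src i v := by
        intro v
        rcases hb : ballB edges src (i + 1) v with _ | _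
        · rcases hb' : ballB edges src i v with _ | _
          · rfl
          · have := ball_mono edges src (Nat.le_succ i) hb'
            rw [hb] at this
            cases this
        · exact (hg v hb).symm
      have hstab := ball_stab edges src i heq
      have hspec := Nat.find_spec h
      obtain ⟨c, hc'⟩ := Nat.exists_eq_add_of_le (Nat.le_of_lt hi)
      rw [← hj0, hc'] at hspec
      rw [hstab c dst] at hspec
      exact Nat.find_min h (by omega) hspec
    obtain ⟨v, hv1, hv0⟩ := hgrow
    have hss : ((nodesList edges src).toFinset.filter (fun v => ballB edges src i v = true))
        ⊂ ((nodesList edges src).toFinset.filter (fun v => ballB edges src (i + 1) v = true)) := by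
      constructor
      · intro x hx
        simp only [Finset.mem_filter] at hx ⊢
        exact ⟨hx.1, ball_mono edges src (by omega) hx.2⟩
      · intro hsub
        have hvmem : v ∈ ((nodesList edges src).toFinset.filter
            (fun v => ballB edges src (i + 1) v = true)) := by
          simp only [Finset.mem_filter, List.mem_toFinset]
          exact ⟨ball_mem_nodes edges src hv1, hv1⟩
        have := hsub hvmem
        simp only [Finset.mem_filter] at this
        rw [this.2] at hv0; exact Bool.noConfusion hv0
    have := Finset.card_lt_card hss
    omega
  have hchain : ∀ i, i ≤ j0 →
      i + 1 ≤ ((nodesList edges src).toFinset.filter (fun v => ballB edges src i v = true)).card := by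
    intro i
    induction i with
    | zero =>
      intro _
      have : src ∈ ((nodesList edges src).toFinset.filter (fun v => ballB edges src 0 v = true)) := by
        simp [nodesList, ballB]
      have := Finset.card_pos.mpr ⟨src, this⟩
      omega
    | succ i ih =>
      intro hle
      have h1 := ih (by omega)
      have h2 := hstrict i (by omega)
      omega
  have hbig := hchain j0 (le_refl j0)
  have hsmall : ((nodesList edges src).toFinset.filter
      (fun v => ballB edges src j0 v = true)).card ≤ 2 * edges.length + 1 := by
    calc _ ≤ (nodesList edges src).toFinset.card := Finset.card_filter_le _ _
      _ ≤ (nodesList edges src).length := List.toFinset_card_le _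
      _ = 2 * edges.length + 1 := length_nodesList edges src
  omega

----------------------------------------------------------------------------------------------
-- Part 6: B computes distFrom 0, and the verdicts.
----------------------------------------------------------------------------------------------

theorem shortest_neighbour_alt_eq_distFrom (edges : List (String × String)) (src dst : String) :
    shortest_neighbour_alt edges src dst = distFrom edges src dst 0 := by
  unfold shortest_neighbour_alt
  rw [bfRounds_eq_roundsIter]
  set d0 : PySem.Dict String Int := PySem.Dict.empty.insert src 0 with hd0
  have hget0 : ∀ v m, d0.get? v = some m → v = src ∧ m = 0 := by
    intro v m hv
    by_cases h : v = src
    · subst h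
      rw [hd0, PySem.Dict.get?_insert_self] at hv
      cases hv; exact ⟨rfl, rfl⟩
    · rw [hd0, PySem.Dict.get?_insert_of_ne _ _ h, PySem.Dict.get?_empty] at hv
      cases hv
  have hS0 : Sound edges src d0 := by
    intro v m hv
    obtain ⟨rfl, rfl⟩ := hget0 v m hv
    exact ⟨0, by simp, by simp [ballB]⟩
  have hC0 : Complete edges src 0 d0 := by
    intro v j hj hb
    have hj0 : j = 0 := by omega
    subst hj0
    simp only [ballB, beq_iff_eq] at hb
    subst hb
    exact ⟨0, by rw [hd0]; exact PySem.Dict.get?_insert_self .., by simp⟩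
  obtain ⟨hS, hC⟩ := roundsIter_Sound_Complete edges src (2 * edges.length) 0 d0 hS0 hC0
  set dN := roundsIter edges (2 * edges.length) d0
  show dN.get? dst = distFrom edges src dst 0
  by_cases h : ∃ j, ballB edges src j dst = true
  · have h' : ∃ j, ballB edges src (0 + j) dst = true := by simpa using h
    have hfind : Nat.find h' = Nat.find h := le_antisymm
      (Nat.find_min' h' (by simpa using Nat.find_spec h))
      (Nat.find_min' h (by simpa using Nat.find_spec h'))
    have hle : Nat.find h ≤ 2 * edges.length := find_le_bound edges src dst h
    obtain ⟨m, hm, hmle⟩ := hC dst (Nat.find h) (by omega) (Nat.find_spec h)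
    obtain ⟨k, rfl, hbk⟩ := hS dst m hm
    have hge : Nat.find h ≤ k := Nat.find_min' h hbk
    have hkeq : k = Nat.find h := by
      have : (k : Int) ≤ (Nat.find h : Int) := hmle
      omega
    rw [distFrom, dif_pos h', hfind, hm, hkeq]
    simp
  · have h' : ¬ ∃ j, ballB edges src (0 + j) dst = true := by simpa using h
    rw [distFrom, dif_neg h']
    rcases hm : dN.get? dst with _ | m
    · rfl
    · exfalso
      obtain ⟨k, _, hbk⟩ := hS dst m hm
      exact h ⟨k, hbk⟩

-- ===== VERDICT (by name: the statement is the Claim_ definition above) =====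
theorem shortest_neighbour_spec : Claim_equal_shortest_neighbour := by
  intro edges src dst _ _
  unfold Spec_shortest_neighbour
  rw [shortest_neighbour_eq_distFrom, shortest_neighbour_alt_eq_distFrom]
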